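-- pv_equiv track=rewrite | github.com/ktsuruta/XbrlJapanWeb | module.py | sort_elements_by_year
-- ===== SOURCE A (Python) =====
-- def sort_list(dict):
--     '''
--     :param dict:
--     :return: list of value
--     '''
--
--     if 'FilingDateInstant' in dict:
--         return ['FilingDateInstant']
--
--     if 'CurrentYTDDuration_NonConsolidatedMember' in dict:
--         return ['CurrentYTDDuration_NonConsolidatedMember']
--
--     if 'CurrentYTDDuration' in dict:
--         return ['CurrentYTDDuration']
--
--     if 'CurrentQuarterInstant_NonConsolidatedMember' in dict:
--         return ['CurrentQuarterInstant_NonConsolidatedMember']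
--
--     if 'CurrentQuarterInstant' in dict:
--         return ['CurrentQuarterInstant']
--
--     if 'InterimDuration_NonConsolidatedMember' in dict:
--         return ['InterimDuration_NonConsolidatedMember', 'Prior1YearDuration_NonConsolidatedMember', 'Prior2YearDuration_NonConsolidatedMember']
--
--     if 'InterimDuration' in dict:
--         return ['InterimDuration', 'Prior1YearDuration', 'Prior2YearDuration']
--
--     if 'InterimInstant_NonConsolidatedMember' in dict:
--         return ['InterimInstant_NonConsolidatedMember', 'Prior1InterimInstant_NonConsolidatedMember', 'Prior2InterimInstant_NonConsolidatedMember']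
--
--     if 'InterimInstant' in dict:
--         return ['InterimInstant', 'Prior1InterimInstant', 'Prior2InterimInstant']
--
--     if 'CurrentYearInstant_NonConsolidatedMember' in dict:
--         return ['CurrentYearInstant_NonConsolidatedMember','Prior1YearInstant_NonConsolidatedMember','Prior1YearInstant_NonConsolidatedMember','Prior2YearInstant_NonConsolidatedMember','Prior4YearInstant_NonConsolidatedMember']
--
--     if 'CurrentYearInstant' in dict:
--         return ['CurrentYearInstant','Prior1YearInstant','Prior1YearInstant','Prior2YearInstant','Prior4YearInstant']
--
--     if 'CurrentYearDuration_NonConsolidatedMember' in dict: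
--         return ['CurrentYearDuration_NonConsolidatedMember','Prior1YearDuration_NonConsolidatedMember','Prior2YearDuration_NonConsolidatedMember','Prior3YearDuration_NonConsolidatedMember','Prior4YearDuration_NonConsolidatedMember']
--
--     if 'CurrentYearDuration' in dict:
--         return ['CurrentYearDuration','Prior1YearDuration','Prior2YearDuration','Prior3YearDuration','Prior4YearDuration']
--
-- def sort_elements_by_year(dict):
--     '''
--     :param dict:
--     :return: list of value
--     '''
--     try:
--         return_list = []
--         elements = sort_list(dict)
--         for element in elements:
--             if element in dict:
--                 return_list.append(dict[element])
--             else: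
--                 return_list.append(None)
--         return return_list
--     except:
--         return []
-- ===== SOURCE B (Python) =====
-- # Inverted traversal: instead of probing 13 context names against the dict in
-- # cascade order, scan the dict's own keys ONCE, rank each by a priority map,
-- # take the minimal rank, and emit the output-key list for that rank.
--
-- _PROBES = [
--     'FilingDateInstant',
--     'CurrentYTDDuration_NonConsolidatedMember',
--     'CurrentYTDDuration',
--     'CurrentQuarterInstant_NonConsolidatedMember',
--     'CurrentQuarterInstant',
--     'InterimDuration_NonConsolidatedMember',
--     'InterimDuration',
--     'InterimInstant_NonConsolidatedMember',
--     'InterimInstant',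
--     'CurrentYearInstant_NonConsolidatedMember',
--     'CurrentYearInstant',
--     'CurrentYearDuration_NonConsolidatedMember',
--     'CurrentYearDuration',
-- ]
--
-- _OUTPUTS = [
--     ['FilingDateInstant'],
--     ['CurrentYTDDuration_NonConsolidatedMember'],
--     ['CurrentYTDDuration'],
--     ['CurrentQuarterInstant_NonConsolidatedMember'],
--     ['CurrentQuarterInstant'],
--     ['InterimDuration_NonConsolidatedMember', 'Prior1YearDuration_NonConsolidatedMember', 'Prior2YearDuration_NonConsolidatedMember'],
--     ['InterimDuration', 'Prior1YearDuration', 'Prior2YearDuration'],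
--     ['InterimInstant_NonConsolidatedMember', 'Prior1InterimInstant_NonConsolidatedMember', 'Prior2InterimInstant_NonConsolidatedMember'],
--     ['InterimInstant', 'Prior1InterimInstant', 'Prior2InterimInstant'],
--     ['CurrentYearInstant_NonConsolidatedMember', 'Prior1YearInstant_NonConsolidatedMember', 'Prior1YearInstant_NonConsolidatedMember', 'Prior2YearInstant_NonConsolidatedMember', 'Prior4YearInstant_NonConsolidatedMember'],
--     ['CurrentYearInstant', 'Prior1YearInstant', 'Prior1YearInstant', 'Prior2YearInstant', 'Prior4YearInstant'],
--     ['CurrentYearDuration_NonConsolidatedMember', 'Prior1YearDuration_NonConsolidatedMember', 'Prior2YearDuration_NonConsolidatedMember', 'Prior3YearDuration_NonConsolidatedMember', 'Prior4YearDuration_NonConsolidatedMember'],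
--     ['CurrentYearDuration', 'Prior1YearDuration', 'Prior2YearDuration', 'Prior3YearDuration', 'Prior4YearDuration'],
-- ]
--
-- _RANK = {p: i for i, p in enumerate(_PROBES)}
--
--
-- def sort_elements_by_year(dict):
--     best = min((_RANK[k] for k in dict if k in _RANK), default=None)
--     if best is None:
--         return []
--     return [dict.get(k) for k in _OUTPUTS[best]]
-- ===== Notes on version B (the rewrite author's own statement) =====
-- stated objective: alternative
-- what changed: Inverts the traversal: instead of A's cascade of 13 membership probes against the dict, B scans the dict's own keys once, maps each to a priority rank via a precomputed rank dict, selects the minimal rank with min(..., default=None), and emits dict.get over the output-key row for that rank (empty list when no key is ranked, replacing A's exception path).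
import Mathlib
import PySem

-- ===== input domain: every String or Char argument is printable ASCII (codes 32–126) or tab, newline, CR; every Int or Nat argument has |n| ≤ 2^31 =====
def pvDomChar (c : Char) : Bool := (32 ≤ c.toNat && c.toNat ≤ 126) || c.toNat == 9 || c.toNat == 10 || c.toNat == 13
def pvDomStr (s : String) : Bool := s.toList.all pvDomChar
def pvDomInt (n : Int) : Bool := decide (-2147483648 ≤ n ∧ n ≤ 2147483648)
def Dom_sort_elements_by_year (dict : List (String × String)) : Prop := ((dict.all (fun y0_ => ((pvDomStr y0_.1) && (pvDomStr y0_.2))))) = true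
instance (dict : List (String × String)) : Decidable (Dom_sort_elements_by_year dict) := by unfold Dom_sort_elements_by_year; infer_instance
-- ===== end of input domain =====

-- B inverts the traversal: one pass over the dict's own keys selecting the minimal priority rank, instead of A's 13-probe cascade; equivalence is about the return value.

-- ===== PORT A =====
-- 'k in dict' (first-match association-list semantics)
def pvMemA (d : List (String × String)) (k : String) : Bool := d.any (fun p => p.1 == k)
-- 'dict[k]' (guarded by membership in A, so the Option is always some there)
def pvGetA (d : List (String × String)) (k : String) : Option String := (d.find? (fun p => p.1 == k)).map (·.2)

-- sort_list: the 13-branch cascade; none = Python's fall-off-the-end None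
def sort_list (dict : List (String × String)) : Option (List String) :=
  if pvMemA dict "FilingDateInstant" then some ["FilingDateInstant"]
  else if pvMemA dict "CurrentYTDDuration_NonConsolidatedMember" then some ["CurrentYTDDuration_NonConsolidatedMember"]
  else if pvMemA dict "CurrentYTDDuration" then some ["CurrentYTDDuration"]
  else if pvMemA dict "CurrentQuarterInstant_NonConsolidatedMember" then some ["CurrentQuarterInstant_NonConsolidatedMember"]
  else if pvMemA dict "CurrentQuarterInstant" then some ["CurrentQuarterInstant"]
  else if pvMemA dict "InterimDuration_NonConsolidatedMember" then some ["InterimDuration_NonConsolidatedMember", "Prior1YearDuration_NonConsolidatedMember", "Prior2YearDuration_NonConsolidatedMember"]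
  else if pvMemA dict "InterimDuration" then some ["InterimDuration", "Prior1YearDuration", "Prior2YearDuration"]
  else if pvMemA dict "InterimInstant_NonConsolidatedMember" then some ["InterimInstant_NonConsolidatedMember", "Prior1InterimInstant_NonConsolidatedMember", "Prior2InterimInstant_NonConsolidatedMember"]
  else if pvMemA dict "InterimInstant" then some ["InterimInstant", "Prior1InterimInstant", "Prior2InterimInstant"]
  else if pvMemA dict "CurrentYearInstant_NonConsolidatedMember" then some ["CurrentYearInstant_NonConsolidatedMember", "Prior1YearInstant_NonConsolidatedMember", "Prior1YearInstant_NonConsolidatedMember", "Prior2YearInstant_NonConsolidatedMember", "Prior4YearInstant_NonConsolidatedMember"]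
  else if pvMemA dict "CurrentYearInstant" then some ["CurrentYearInstant", "Prior1YearInstant", "Prior1YearInstant", "Prior2YearInstant", "Prior4YearInstant"]
  else if pvMemA dict "CurrentYearDuration_NonConsolidatedMember" then some ["CurrentYearDuration_NonConsolidatedMember", "Prior1YearDuration_NonConsolidatedMember", "Prior2YearDuration_NonConsolidatedMember", "Prior3YearDuration_NonConsolidatedMember", "Prior4YearDuration_NonConsolidatedMember"]
  else if pvMemA dict "CurrentYearDuration" then some ["CurrentYearDuration", "Prior1YearDuration", "Prior2YearDuration", "Prior3YearDuration", "Prior4YearDuration"]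
  else none

-- the try-block: iterating over None raises, caught by 'except: return []'
def sort_elements_by_year (dict : List (String × String)) : List (Option String) :=
  match sort_list dict with
  | none => []
  | some elements =>
      elements.foldl
        (fun return_list element =>
          if pvMemA dict element then return_list ++ [pvGetA dict element]
          else return_list ++ [none])
        []

-- ===== PORT B =====
-- the _RANK dict built from _PROBES (probe name → its priority index)
def pvRankTable : List (String × Nat) :=
  [ ("FilingDateInstant", 0),
    ("CurrentYTDDuration_NonConsolidatedMember", 1),
    ("CurrentYTDDuration", 2),
    ("CurrentQuarterInstant_NonConsolidatedMember", 3),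
    ("CurrentQuarterInstant", 4),
    ("InterimDuration_NonConsolidatedMember", 5),
    ("InterimDuration", 6),
    ("InterimInstant_NonConsolidatedMember", 7),
    ("InterimInstant", 8),
    ("CurrentYearInstant_NonConsolidatedMember", 9),
    ("CurrentYearInstant", 10),
    ("CurrentYearDuration_NonConsolidatedMember", 11),
    ("CurrentYearDuration", 12) ]

-- '_RANK[k] for k in dict if k in _RANK' for one key (lookup guarded by membership = dict get)
def pvRank (k : String) : Option Nat := (pvRankTable.find? (fun p => p.1 == k)).map (·.2)

-- the _OUTPUTS table (priority index → output key list)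
def pvOutputs : List (List String) :=
  [ ["FilingDateInstant"],
    ["CurrentYTDDuration_NonConsolidatedMember"],
    ["CurrentYTDDuration"],
    ["CurrentQuarterInstant_NonConsolidatedMember"],
    ["CurrentQuarterInstant"],
    ["InterimDuration_NonConsolidatedMember", "Prior1YearDuration_NonConsolidatedMember", "Prior2YearDuration_NonConsolidatedMember"],
    ["InterimDuration", "Prior1YearDuration", "Prior2YearDuration"],
    ["InterimInstant_NonConsolidatedMember", "Prior1InterimInstant_NonConsolidatedMember", "Prior2InterimInstant_NonConsolidatedMember"],
    ["InterimInstant", "Prior1InterimInstant", "Prior2InterimInstant"],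
    ["CurrentYearInstant_NonConsolidatedMember", "Prior1YearInstant_NonConsolidatedMember", "Prior1YearInstant_NonConsolidatedMember", "Prior2YearInstant_NonConsolidatedMember", "Prior4YearInstant_NonConsolidatedMember"],
    ["CurrentYearInstant", "Prior1YearInstant", "Prior1YearInstant", "Prior2YearInstant", "Prior4YearInstant"],
    ["CurrentYearDuration_NonConsolidatedMember", "Prior1YearDuration_NonConsolidatedMember", "Prior2YearDuration_NonConsolidatedMember", "Prior3YearDuration_NonConsolidatedMember", "Prior4YearDuration_NonConsolidatedMember"],
    ["CurrentYearDuration", "Prior1YearDuration", "Prior2YearDuration", "Prior3YearDuration", "Prior4YearDuration"] ]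

-- 'dict.get(k)'
def pvGetB (d : List (String × String)) (k : String) : Option String := (d.find? (fun p => p.1 == k)).map (·.2)

-- min((_RANK[k] for k in dict if k in _RANK), default=None); then the _OUTPUTS row
-- (_OUTPUTS[best] is always in range since every rank is < 13; getD is the direct index)
def sort_elements_by_year_alt (dict : List (String × String)) : List (Option String) :=
  match PySem.List.min? (dict.filterMap (fun p => pvRank p.1)) (fun r => r) with
  | none => []
  | some best => (pvOutputs.getD best []).map (fun k => pvGetB dict k)

-- ===== PRECONDITION & SPEC =====
def Spec_sort_elements_by_year (dict : List (String × String)) (out : List (Option String)) : Prop := out = sort_elements_by_year_alt dict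
instance (dict : List (String × String)) (out : List (Option String)) : Decidable (Spec_sort_elements_by_year dict out) := by unfold Spec_sort_elements_by_year; infer_instance

-- ===== CLAIM (what is proved, stated in full; the proofs are below) =====
def Claim_equal_sort_elements_by_year : Prop := ∀ (dict : List (String × String)), Dom_sort_elements_by_year dict → Spec_sort_elements_by_year dict (sort_elements_by_year dict)

-- ===== LEMMAS AND PROOFS =====

-- the probe name carrying a given rank
def pvProbeOf (i : Nat) : String := (pvRankTable.map (·.1)).getD i ""

-- a rank determines its probe name and is < 13
theorem pvRank_char (k : String) (j : Nat) (h : pvRank k = some j) :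
    j < 13 ∧ k = pvProbeOf j := by
  simp only [pvRank, pvRankTable, List.find?] at h
  repeat' split at h
  all_goals simp_all [pvProbeOf, pvRankTable]
  all_goals (subst h; exact ⟨by omega, rfl⟩)

theorem pvMemA_of_mem (d : List (String × String)) (p : String × String) (s : String)
    (hp : p ∈ d) (hk : p.1 = s) : pvMemA d s = true := by
  simp only [pvMemA, List.any_eq_true]
  exact ⟨p, hp, by simp [hk]⟩

-- lower bound on every rank occurring in the dict, from the absent lower probes
theorem pvRank_lb (d : List (String × String)) (i : Nat)
    (hlow : ∀ c, c < i → pvMemA d (pvProbeOf c) = false) :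
    ∀ j ∈ d.filterMap (fun p => pvRank p.1), i ≤ j := by
  intro j hj
  rcases List.mem_filterMap.mp hj with ⟨p, hp, hr⟩
  rcases pvRank_char _ _ hr with ⟨_, hk⟩
  by_contra hlt
  push Not at hlt
  have hf := hlow j hlt
  rw [pvMemA_of_mem d p (pvProbeOf j) hp hk] at hf
  exact Bool.true_eq_false.mp hf

-- a present probe contributes its rank
theorem pvRank_mem (d : List (String × String)) (i : Nat)
    (h : pvMemA d (pvProbeOf i) = true) (hr : pvRank (pvProbeOf i) = some i) :
    i ∈ d.filterMap (fun p => pvRank p.1) := by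
  simp only [pvMemA, List.any_eq_true] at h
  rcases h with ⟨p, hp, hpk⟩
  exact List.mem_filterMap.mpr ⟨p, hp, by rw [eq_of_beq hpk]; exact hr⟩

-- min? hits exactly the member that bounds all others from below
theorem min?_eq_some_of (l : List Nat) (i : Nat)
    (hmem : i ∈ l) (hlb : ∀ j ∈ l, i ≤ j) :
    PySem.List.min? l (fun r => r) = some i := by
  cases h : PySem.List.min? l (fun r => r) with
  | none =>
      rw [PySem.List.min?_eq_none_iff] at h
      simp [h] at hmem
  | some m =>
      have hm := PySem.List.min?_mem h
      have h1 := PySem.List.min?_isMin h i hmem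
      have h2 := hlb m hm
      simp only [Option.some.injEq]
      omega

-- A's append loop over a key list builds exactly B's map of plain gets
theorem foldl_keys_eq_map (d : List (String × String)) (ks : List String) (acc : List (Option String)) :
    ks.foldl
      (fun return_list element =>
        if pvMemA d element then return_list ++ [pvGetA d element]
        else return_list ++ [none])
      acc
    = acc ++ ks.map (fun k => pvGetB d k) := by
  induction ks generalizing acc with
  | nil => simp
  | cons k ks ih =>
    simp only [List.foldl_cons, List.map_cons]
    by_cases hm : pvMemA d k = true
    · rw [if_pos hm, ih, List.append_assoc]
      simp [pvGetA, pvGetB]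
    · have hfind : d.find? (fun p => p.1 == k) = none := by
        rw [List.find?_eq_none]
        intro p hp
        simp only [pvMemA, List.any_eq_true] at hm
        exact fun hk => hm ⟨p, hp, hk⟩
      rw [if_neg hm, ih, List.append_assoc]
      simp [pvGetB, hfind]

-- in a branch where rank i is the minimum, B returns row i
theorem alt_eq_row (d : List (String × String)) (i : Nat)
    (hbest : PySem.List.min? (d.filterMap (fun p => pvRank p.1)) (fun r => r) = some i) :
    sort_elements_by_year_alt d = (pvOutputs.getD i []).map (fun k => pvGetB d k) := by
  simp [sort_elements_by_year_alt, hbest]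

-- ===== VERDICT (by name: the statement is the Claim_ definition above) =====
theorem sort_elements_by_year_spec : Claim_equal_sort_elements_by_year := by
  intro dict _
  show sort_elements_by_year dict = sort_elements_by_year_alt dict
  unfold sort_elements_by_year sort_list
  cases _h0 : pvMemA dict "FilingDateInstant"
  case true =>
    rw [alt_eq_row dict 0 (min?_eq_some_of _ 0 (pvRank_mem dict 0 _h0 rfl) (fun j _ => Nat.zero_le j))]
    simp only [foldl_keys_eq_map, List.nil_append]; rfl
  all_goals cases _h1 : pvMemA dict "CurrentYTDDuration_NonConsolidatedMember"
  case true =>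
    have hlow : ∀ c, c < 1 → pvMemA dict (pvProbeOf c) = false := by
      intro c hc; interval_cases c; assumption
    rw [alt_eq_row dict 1 (min?_eq_some_of _ 1 (pvRank_mem dict 1 _h1 rfl) (pvRank_lb dict 1 hlow))]
    simp only [foldl_keys_eq_map, List.nil_append]; rfl
  all_goals cases _h2 : pvMemA dict "CurrentYTDDuration"
  case true =>
    have hlow : ∀ c, c < 2 → pvMemA dict (pvProbeOf c) = false := by
      intro c hc; interval_cases c <;> assumption
    rw [alt_eq_row dict 2 (min?_eq_some_of _ 2 (pvRank_mem dict 2 _h2 rfl) (pvRank_lb dict 2 hlow))]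
    simp only [foldl_keys_eq_map, List.nil_append]; rfl
  all_goals cases _h3 : pvMemA dict "CurrentQuarterInstant_NonConsolidatedMember"
  case true =>
    have hlow : ∀ c, c < 3 → pvMemA dict (pvProbeOf c) = false := by
      intro c hc; interval_cases c <;> assumption
    rw [alt_eq_row dict 3 (min?_eq_some_of _ 3 (pvRank_mem dict 3 _h3 rfl) (pvRank_lb dict 3 hlow))]
    simp only [foldl_keys_eq_map, List.nil_append]; rfl
  all_goals cases _h4 : pvMemA dict "CurrentQuarterInstant"
  case true =>
    have hlow : ∀ c, c < 4 → pvMemA dict (pvProbeOf c) = false := by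
      intro c hc; interval_cases c <;> assumption
    rw [alt_eq_row dict 4 (min?_eq_some_of _ 4 (pvRank_mem dict 4 _h4 rfl) (pvRank_lb dict 4 hlow))]
    simp only [foldl_keys_eq_map, List.nil_append]; rfl
  all_goals cases _h5 : pvMemA dict "InterimDuration_NonConsolidatedMember"
  case true =>
    have hlow : ∀ c, c < 5 → pvMemA dict (pvProbeOf c) = false := by
      intro c hc; interval_cases c <;> assumption
    rw [alt_eq_row dict 5 (min?_eq_some_of _ 5 (pvRank_mem dict 5 _h5 rfl) (pvRank_lb dict 5 hlow))]
    simp only [foldl_keys_eq_map, List.nil_append]; rfl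
  all_goals cases _h6 : pvMemA dict "InterimDuration"
  case true =>
    have hlow : ∀ c, c < 6 → pvMemA dict (pvProbeOf c) = false := by
      intro c hc; interval_cases c <;> assumption
    rw [alt_eq_row dict 6 (min?_eq_some_of _ 6 (pvRank_mem dict 6 _h6 rfl) (pvRank_lb dict 6 hlow))]
    simp only [foldl_keys_eq_map, List.nil_append]; rfl
  all_goals cases _h7 : pvMemA dict "InterimInstant_NonConsolidatedMember"
  case true =>
    have hlow : ∀ c, c < 7 → pvMemA dict (pvProbeOf c) = false := by
      intro c hc; interval_cases c <;> assumption
    rw [alt_eq_row dict 7 (min?_eq_some_of _ 7 (pvRank_mem dict 7 _h7 rfl) (pvRank_lb dict 7 hlow))]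
    simp only [foldl_keys_eq_map, List.nil_append]; rfl
  all_goals cases _h8 : pvMemA dict "InterimInstant"
  case true =>
    have hlow : ∀ c, c < 8 → pvMemA dict (pvProbeOf c) = false := by
      intro c hc; interval_cases c <;> assumption
    rw [alt_eq_row dict 8 (min?_eq_some_of _ 8 (pvRank_mem dict 8 _h8 rfl) (pvRank_lb dict 8 hlow))]
    simp only [foldl_keys_eq_map, List.nil_append]; rfl
  all_goals cases _h9 : pvMemA dict "CurrentYearInstant_NonConsolidatedMember"
  case true =>
    have hlow : ∀ c, c < 9 → pvMemA dict (pvProbeOf c) = false := by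
      intro c hc; interval_cases c <;> assumption
    rw [alt_eq_row dict 9 (min?_eq_some_of _ 9 (pvRank_mem dict 9 _h9 rfl) (pvRank_lb dict 9 hlow))]
    simp only [foldl_keys_eq_map, List.nil_append]; rfl
  all_goals cases _h10 : pvMemA dict "CurrentYearInstant"
  case true =>
    have hlow : ∀ c, c < 10 → pvMemA dict (pvProbeOf c) = false := by
      intro c hc; interval_cases c <;> assumption
    rw [alt_eq_row dict 10 (min?_eq_some_of _ 10 (pvRank_mem dict 10 _h10 rfl) (pvRank_lb dict 10 hlow))]
    simp only [foldl_keys_eq_map, List.nil_append]; rfl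
  all_goals cases _h11 : pvMemA dict "CurrentYearDuration_NonConsolidatedMember"
  case true =>
    have hlow : ∀ c, c < 11 → pvMemA dict (pvProbeOf c) = false := by
      intro c hc; interval_cases c <;> assumption
    rw [alt_eq_row dict 11 (min?_eq_some_of _ 11 (pvRank_mem dict 11 _h11 rfl) (pvRank_lb dict 11 hlow))]
    simp only [foldl_keys_eq_map, List.nil_append]; rfl
  all_goals cases _h12 : pvMemA dict "CurrentYearDuration"
  case true =>
    have hlow : ∀ c, c < 12 → pvMemA dict (pvProbeOf c) = false := by
      intro c hc; interval_cases c <;> assumption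
    rw [alt_eq_row dict 12 (min?_eq_some_of _ 12 (pvRank_mem dict 12 _h12 rfl) (pvRank_lb dict 12 hlow))]
    simp only [foldl_keys_eq_map, List.nil_append]; rfl
  -- all 13 probes absent: no key has a rank, so B's min is over the empty list
  have hlow : ∀ c, c < 13 → pvMemA dict (pvProbeOf c) = false := by
    intro c hc; interval_cases c <;> assumption
  have hnil : dict.filterMap (fun p => pvRank p.1) = [] := by
    rw [List.eq_nil_iff_forall_not_mem]
    intro j hj
    rcases List.mem_filterMap.mp hj with ⟨p, hp, hr⟩
    have h13 := (pvRank_char _ _ hr).1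
    have := pvRank_lb dict 13 hlow j hj
    omega
  simp [sort_elements_by_year_alt, hnil, PySem.List.min?]
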